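-- pv_equiv track=rewrite | github.com/Low-Runahead-Frodo/Frodo | psrc/memory.py | _pack_to_words
-- ===== SOURCE A (Python) =====
-- def _pack_to_words(data_list, data_bit_width):
--     """
--     将数据列表按指定位宽打包为64位单元列表。
--     采用小端方式（先插入的数据在低位），若最后不足64位自动填0。
--
--     参数:
--         data_list (list of int): 要打包的数据列表。
--         data_bit_width (int): 每个数据的位宽（例如8或16）。
--
--     返回:
--         list of int: 打包后的64位整数列表。
--     """
--     result = []
--     current_word = 0
--     bits_in_word = 0
--     mask = (1 << data_bit_width) - 1
--
--     for value in data_list: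
--         # 限制数据位宽
--         value = value & mask
--         # 合并当前数据
--         current_word |= (value << bits_in_word)
--         bits_in_word += data_bit_width
--
--         # 当填满或超出64位时需要处理
--         if bits_in_word >= 64:
--             if bits_in_word > 64:
--                 # 数据跨越两个64位单元
--                 extra_bits = bits_in_word - 64
--                 # 将低64位保存
--                 result.append(current_word & ((1 << 64) - 1))
--                 # 剩下的 extra_bits 属于当前值的高位部分
--                 current_word = value >> (data_bit_width - extra_bits)
--                 bits_in_word = extra_bits
--             else:
--                 result.append(current_word)
--                 current_word = 0
--                 bits_in_word = 0
--     # 若最后还有剩余部分，则补0保存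
--     if bits_in_word > 0:
--         result.append(current_word)
--     return result
-- ===== SOURCE B (Python) =====
-- def _pack_to_words(data_list, data_bit_width):
--     """Pack data_list (little-endian, data_bit_width bits each) into 64-bit words
--     by building one big integer and then chunking it, instead of streaming with a
--     straddle/carry branch."""
--     mask = (1 << data_bit_width) - 1
--     total = 0
--     for i, value in enumerate(data_list):
--         total |= (value & mask) << (i * data_bit_width)
--     num_words = (len(data_list) * data_bit_width + 63) // 64
--     result = []
--     for _ in range(num_words):
--         result.append(total & ((1 << 64) - 1))
--         total >>= 64
--     return result
-- ===== Notes on version B (the rewrite author's own statement) =====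
-- stated objective: simpler
-- what changed: B replaces A's streaming word-packer with its straddle/carry branch by building one big integer (OR-ing each masked value at its bit offset) and then slicing it into ceil(n*w/64) 64-bit words.
-- outside the precondition, e.g. on _pack_to_words([1, 2], 128): A returns [1, 0, 2], B returns [1, 0, 2, 0]; on _pack_to_words([5], 65): A returns [5, 0], B returns [5, 0]; on _pack_to_words([1, 2, 3], 100): A raises ValueError, B returns [1, 137438953472, 0, 768, 0]
import Mathlib
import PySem

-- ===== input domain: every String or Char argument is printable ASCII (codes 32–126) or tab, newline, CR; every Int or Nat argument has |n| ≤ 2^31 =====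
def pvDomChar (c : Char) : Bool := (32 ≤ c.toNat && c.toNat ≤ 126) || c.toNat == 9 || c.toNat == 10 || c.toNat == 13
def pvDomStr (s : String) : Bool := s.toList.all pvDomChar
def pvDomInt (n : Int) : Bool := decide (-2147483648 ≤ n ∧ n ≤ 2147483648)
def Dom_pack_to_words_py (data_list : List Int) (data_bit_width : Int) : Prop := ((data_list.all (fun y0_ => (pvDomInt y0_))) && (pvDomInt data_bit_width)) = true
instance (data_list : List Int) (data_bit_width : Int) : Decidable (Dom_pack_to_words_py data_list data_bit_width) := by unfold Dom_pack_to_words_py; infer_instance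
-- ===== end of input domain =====

-- B builds the whole packed value as one big integer and then chunks it into 64-bit
-- words, replacing A's streaming pack with its straddle/carry branch (objective: simpler).

-- ===== PORT A =====
-- one step of A's for-loop; state = (result, current_word, bits_in_word)
def packStepA (data_bit_width mask : Int) (st : List Int × Int × Int) (value : Int) : List Int × Int × Int :=
  let value := PySem.Int.band value mask
  let current_word := PySem.Int.bor st.2.1 (value <<< st.2.2.toNat)
  let bits_in_word := st.2.2 + data_bit_width
  if bits_in_word ≥ 64 then
    if bits_in_word > 64 then
      let extra_bits := bits_in_word - 64
      (st.1 ++ [PySem.Int.band current_word ((1 <<< (64 : Nat)) - 1)],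
       value >>> (data_bit_width - extra_bits).toNat, extra_bits)
    else
      (st.1 ++ [current_word], 0, 0)
  else
    (st.1, current_word, bits_in_word)

def pack_to_words_py (data_list : List Int) (data_bit_width : Int) : List Int :=
  -- shift counts are taken with .toNat: under Pre_ every shift count A uses is ≥ 0 (where
  -- Python would raise ValueError the input is outside Pre_), so this is exact there
  let mask : Int := (1 <<< data_bit_width.toNat) - 1
  let st := data_list.foldl (packStepA data_bit_width mask) ([], 0, 0)
  if st.2.2 > 0 then st.1 ++ [st.2.1] else st.1

-- ===== PORT B =====
def pack_to_words_py_alt (data_list : List Int) (data_bit_width : Int) : List Int :=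
  let mask : Int := (1 <<< data_bit_width.toNat) - 1
  let total : Int := (PySem.List.enumerate data_list 0).foldl
    (fun t p => PySem.Int.bor t ((PySem.Int.band p.2 mask) <<< (p.1 * data_bit_width).toNat)) 0
  let num_words : Int := PySem.Int.floordiv ((data_list.length : Int) * data_bit_width + 63) 64
  ((PySem.List.pyRange 0 num_words 1).foldl
    (fun (st : List Int × Int) _ =>
      (st.1 ++ [PySem.Int.band st.2 ((1 <<< (64 : Nat)) - 1)], st.2 >>> 64)) ([], total)).1

-- ===== PRECONDITION & SPEC =====
-- Pre_ excludes negative widths, where A raises ValueError ('negative shift count') at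
-- 'mask = (1 << data_bit_width) - 1', and widths above the 64-bit word size, where A
-- raises the same error on all but very short lists and, when it does return, silently
-- drops words of the packed value — an artefact of its one-append-per-element straddle
-- handling on widths beyond the word size the function is written for (e.g. 8 or 16).
def Pre_pack_to_words_py (data_list : List Int) (data_bit_width : Int) : Prop :=
  0 ≤ data_bit_width ∧ data_bit_width ≤ 64
instance (data_list : List Int) (data_bit_width : Int) : Decidable (Pre_pack_to_words_py data_list data_bit_width) := by unfold Pre_pack_to_words_py; infer_instance

def pvWitness_pack_to_words_py : List Int × Int := ([300, -7, 12345], 16)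

def Spec_pack_to_words_py (data_list : List Int) (data_bit_width : Int) (out : List Int) : Prop := out = pack_to_words_py_alt data_list data_bit_width
instance (data_list : List Int) (data_bit_width : Int) (out : List Int) : Decidable (Spec_pack_to_words_py data_list data_bit_width out) := by unfold Spec_pack_to_words_py; infer_instance

-- ===== CLAIM (what is proved, stated in full; the proofs are below) =====
def Claim_equal_pack_to_words_py : Prop := ∀ (data_list : List Int) (data_bit_width : Int), Dom_pack_to_words_py data_list data_bit_width → Pre_pack_to_words_py data_list data_bit_width → Spec_pack_to_words_py data_list data_bit_width (pack_to_words_py data_list data_bit_width)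


-- ===== LEMMAS AND PROOFS =====

-- disjoint-or is addition: a low part below 2^k ORed with a value shifted up by k
theorem pv_lor_sh (k : Nat) : ∀ (b a : Nat), b < 2^k → b ||| (a <<< k) = b + a * 2^k := by
  induction k with
  | zero => intro b a h; interval_cases b; simp
  | succ k ih =>
    intro b a h
    have hb : b = Nat.bit (b % 2 = 1) (b / 2) := by
      by_cases h2 : b % 2 = 1 <;> (simp [Nat.bit, h2]; omega)
    have ha : a <<< (k+1) = Nat.bit false (a <<< k) := by
      simp [Nat.bit, Nat.shiftLeft_eq, pow_succ]; ring
    rw [hb, ha, Nat.lor_bit]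
    have := ih (b / 2) a (by omega)
    by_cases h2 : b % 2 = 1 <;> simp [Nat.bit, h2, this, pow_succ] <;> ring_nf

-- Python's v & ((1 << w) - 1) is v mod 2^w (also for negative v)
theorem pv_band_mask (v : Int) (w : Nat) :
    PySem.Int.band v (((1 <<< w : Nat) : Int) - 1) = v % (2^w) := by
  have h1 : (0:Nat) < 2^w := Nat.two_pow_pos w
  have hP : ((1 <<< w : Nat) : Int) - 1 = ((2^w - 1 : Nat) : Int) := by
    rw [Nat.shiftLeft_eq]; push_cast [h1]; ring
  rw [hP]
  cases v with
  | ofNat m =>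
    rw [show (Int.ofNat m) = ((m : Nat) : Int) from rfl, PySem.Int.band_natCast,
        Nat.and_two_pow_sub_one_eq_mod]
    rw [show ((2:Int)^w) = ((2^w : Nat) : Int) by push_cast; ring]
    exact (Int.natCast_mod m (2^w)).symm
  | negSucc m =>
    have h0 : ¬ (0:Int) ≤ Int.negSucc m := by omega
    have h2 : (0:Int) ≤ ((2^w - 1 : Nat) : Int) := by positivity
    simp only [PySem.Int.band, if_neg h0, if_pos h2, Int.toNat_natCast]
    have h3 : (-Int.negSucc m - 1).toNat = m := by
      simp [Int.negSucc_eq]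
    rw [h3, Nat.land_comm, Nat.and_two_pow_sub_one_eq_mod]
    have h6 : m % 2^w < 2^w := Nat.mod_lt m h1
    have h7 : m % 2^w ≤ 2^w - 1 := Nat.le_sub_one_of_lt h6
    have hm : (m : Int) = ((2^w : Nat) : Int) * ((m / 2^w : Nat) : Int) + ((m % 2^w : Nat) : Int) := by
      exact_mod_cast congrArg (Nat.cast : Nat → Int) (Nat.div_add_mod m (2^w)).symm
    have h4 : Int.negSucc m = ((2^w - 1 - m % 2^w : Nat) : Int) + ((2^w : Nat) : Int) * (-((m / 2^w : Nat) : Int) - 1) := by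
      rw [Int.negSucc_eq]
      have hc : ((2^w - 1 - m % 2^w : Nat) : Int) = ((2^w : Nat) : Int) - 1 - ((m % 2^w : Nat) : Int) := by
        push_cast [h7, h1]; ring
      rw [hc]; linear_combination -hm
    have h8 : 2^w - 1 - m % 2^w < 2^w := by omega
    rw [show ((2:Int)^w) = ((2^w : Nat) : Int) by push_cast; ring, h4,
        Int.add_mul_emod_self_left, Int.emod_eq_of_lt (by positivity) (by exact_mod_cast h8)]

-- the value mod 2^w, as a natural number
def pvRes (w : Nat) (v : Int) : Nat := (v % ((2:Int)^w)).toNat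

theorem pvRes_lt (w : Nat) (v : Int) : pvRes w v < 2^w := by
  have h1 : (0:Int) < 2^w := by positivity
  have h2 := Int.emod_lt_of_pos v h1
  have h3 := Int.emod_nonneg v (by positivity : (2:Int)^w ≠ 0)
  have hcast : ((2:Int))^w = ((2^w : Nat) : Int) := by push_cast; ring
  unfold pvRes
  rw [hcast] at h2 h3
  omega

theorem pvRes_cast (w : Nat) (v : Int) : ((pvRes w v : Nat) : Int) = v % (2^w) :=
  Int.toNat_of_nonneg (Int.emod_nonneg v (by positivity : (2:Int)^w ≠ 0))

-- the big packed integer: value i sits at bit offset i*w (little-endian)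
def pvTot (w : Nat) : List Int → Nat
  | [] => 0
  | v :: vs => pvRes w v + 2^w * pvTot w vs

theorem pvTot_lt (w : Nat) (vs : List Int) : pvTot w vs < 2^(vs.length * w) := by
  induction vs with
  | nil => simp [pvTot]
  | cons v vs ih =>
    have h1 := pvRes_lt w v
    simp only [pvTot, List.length_cons]
    have : (vs.length + 1) * w = w + vs.length * w := by ring
    rw [this, pow_add]
    nlinarith [Nat.two_pow_pos w, Nat.two_pow_pos (vs.length * w)]

theorem pvTot_snoc (w : Nat) (vs : List Int) (v : Int) :
    pvTot w (vs ++ [v]) = pvTot w vs + pvRes w v * 2^(vs.length * w) := by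
  induction vs with
  | nil => simp [pvTot]
  | cons x xs ih =>
    simp only [List.cons_append, pvTot, ih, List.length_cons]
    have : (xs.length + 1) * w = w + xs.length * w := by ring
    rw [this, pow_add]; ring

-- the first n 64-bit words of T, little-endian
def pvChunk : Nat → Nat → List Int
  | 0, _ => []
  | n+1, T => ((T % 2^64 : Nat) : Int) :: pvChunk n (T / 2^64)

theorem pvChunk_congr (n : Nat) : ∀ (T x : Nat), pvChunk n (T + x * 2^(64*n)) = pvChunk n T := by
  induction n with
  | zero => intro T x; simp [pvChunk]
  | succ n ih =>
    intro T x
    have he : x * 2^(64*(n+1)) = (x * 2^(64*n)) * 2^64 := by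
      rw [show 64*(n+1) = 64*n + 64 by ring, pow_add]; ring
    simp only [pvChunk, he, Nat.add_mul_mod_self_right,
      Nat.add_mul_div_right _ _ (Nat.two_pow_pos 64), ih]

theorem pvChunk_snoc (n : Nat) : ∀ (T : Nat),
    pvChunk (n+1) T = pvChunk n T ++ [((T / 2^(64*n) % 2^64 : Nat) : Int)] := by
  induction n with
  | zero => intro T; simp [pvChunk]
  | succ n ih =>
    intro T
    have hd : T / 2^64 / 2^(64*n) = T / 2^(64*(n+1)) := by
      rw [Nat.div_div_eq_div_mul, ← pow_add, show 64 + 64*n = 64*(n+1) by ring]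
    calc pvChunk (n+2) T = ((T % 2^64 : Nat) : Int) :: pvChunk (n+1) (T / 2^64) := rfl
      _ = ((T % 2^64 : Nat) : Int) :: (pvChunk n (T / 2^64) ++ [((T / 2^64 / 2^(64*n) % 2^64 : Nat) : Int)]) := by rw [ih]
      _ = pvChunk (n+1) T ++ [((T / 2^(64*(n+1)) % 2^64 : Nat) : Int)] := by rw [hd]; rfl

-- cast bridges for shifts (definitional)
theorem pv_shiftL_cast (m k : Nat) : ((m : Int) <<< k) = ((m <<< k : Nat) : Int) := rfl
theorem pv_shiftR_cast (m k : Nat) : ((m : Int) >>> k) = ((m >>> k : Nat) : Int) := rfl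
theorem pv_shiftR_cast64 (m : Nat) : ((m : Int) >>> (64:Int)) = ((m >>> 64 : Nat) : Int) :=
  Int.mem_toNat?.mp rfl

-- ===== B-side: the big-total loop =====
theorem pv_B_total (w : Nat) (vs : List Int) : ∀ (s t : Nat), t < 2^(s*w) →
    (PySem.List.enumerate vs ((s : Nat) : Int)).foldl
      (fun acc p => PySem.Int.bor acc
        ((PySem.Int.band p.2 (((1 <<< w : Nat) : Int) - 1)) <<< ((p.1 * ((w : Nat) : Int)).toNat)))
      ((t : Nat) : Int)
    = ((t + 2^(s*w) * pvTot w vs : Nat) : Int) := by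
  induction vs with
  | nil => intro s t ht; simp [PySem.List.enumerate_nil, pvTot]
  | cons v vs ih =>
    intro s t ht
    rw [PySem.List.enumerate_cons, List.foldl_cons]
    have hsh : ((((s : Nat) : Int) * ((w : Nat) : Int)).toNat) = s * w := by
      exact Int.toNat_natCast _
    have hstep : PySem.Int.bor ((t : Nat) : Int)
        ((PySem.Int.band v (((1 <<< w : Nat) : Int) - 1)) <<< ((((s : Nat) : Int) * ((w : Nat) : Int)).toNat))
        = ((t + pvRes w v * 2^(s*w) : Nat) : Int) := by
      rw [hsh, pv_band_mask, ← pvRes_cast, pv_shiftL_cast, PySem.Int.bor_natCast,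
          pv_lor_sh (s*w) t (pvRes w v) ht]
    rw [hstep, show ((s : Nat) : Int) + 1 = (((s+1 : Nat)) : Int) by push_cast; ring]
    have hv := pvRes_lt w v
    have ht' : t + pvRes w v * 2^(s*w) < 2^((s+1)*w) := by
      have : (s+1)*w = w + s*w := by ring
      rw [this, pow_add]
      nlinarith [Nat.two_pow_pos (s*w), Nat.two_pow_pos w]
    rw [ih (s+1) _ ht']
    congr 1
    simp only [pvTot]
    have : (s+1)*w = w + s*w := by ring
    rw [this, pow_add]; ring

-- ===== B-side: the chunking loop =====
theorem pv_B_chunk (n : Nat) : ∀ (T : Nat) (acc : List Int),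
    ((PySem.List.pyRange 0 ((n : Nat) : Int) 1).foldl
      (fun (st : List Int × Int) _ =>
        (st.1 ++ [PySem.Int.band st.2 (((1 <<< (64:Nat) : Nat) : Int) - 1)], st.2 >>> 64))
      (acc, ((T : Nat) : Int)))
    = (acc ++ pvChunk n T, ((T / 2^(64*n) : Nat) : Int)) := by
  induction n with
  | zero => intro T acc; simp [pvChunk]
  | succ n ih =>
    intro T acc
    have hr : PySem.List.pyRange 0 (((n+1 : Nat)) : Int) 1
        = PySem.List.pyRange 0 ((n : Nat) : Int) 1 ++ [((n : Nat) : Int)] := by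
      rw [show (((n+1 : Nat)) : Int) = ((n : Nat) : Int) + 1 by push_cast; ring]
      exact PySem.List.pyRange_one_succ_right (by positivity)
    rw [hr, List.foldl_append, ih]
    simp only [List.foldl_cons, List.foldl_nil]
    refine Prod.ext ?_ ?_
    · simp only
      rw [pv_band_mask, show ((T / 2^(64*n) : Nat) : Int) % 2^64 = ((T / 2^(64*n) % 2^64 : Nat) : Int) by push_cast; ring,
          pvChunk_snoc, List.append_assoc]
    · simp only
      rw [pv_shiftR_cast64, Nat.shiftRight_eq_div_pow, Nat.div_div_eq_div_mul, ← pow_add,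
          show 64*n + 64 = 64*(n+1) by ring]

-- ===== A-side: the streaming loop invariant =====
theorem pv_A_loop (w : Nat) (h64 : w ≤ 64) (hw : 0 < w) (vs : List Int) :
    vs.foldl (packStepA ((w : Nat) : Int) (((1 <<< w : Nat) : Int) - 1)) ([], 0, 0)
    = (pvChunk (vs.length * w / 64) (pvTot w vs),
       ((pvTot w vs / 2^(64 * (vs.length * w / 64)) : Nat) : Int),
       ((vs.length * w % 64 : Nat) : Int)) := by
  induction vs using List.reverseRecOn with
  | nil => simp [pvChunk, pvTot]
  | append_singleton vs v ih =>
    rw [List.foldl_append, ih, List.foldl_cons, List.foldl_nil]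
    set k := vs.length with hk
    set T := pvTot w vs with hT
    set m := k * w / 64 with hm
    set b := k * w % 64 with hb
    have hkw : k * w = 64 * m + b := (Nat.div_add_mod (k*w) 64).symm
    have hblt : b < 64 := Nat.mod_lt _ (by norm_num)
    have hTlt : T < 2^(k*w) := pvTot_lt w vs
    set c := T / 2 ^ (64 * m) with hc
    have hclt : c < 2 ^ b := by
      rw [hc, Nat.div_lt_iff_lt_mul (Nat.two_pow_pos _), ← pow_add]
      rw [show b + 64*m = 64*m + b by ring, ← hkw]; exact hTlt
    have hv := pvRes_lt w v
    set v' := pvRes w v with hv'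
    have hT' : pvTot w (vs ++ [v]) = T + (v' * 2^b) * 2^(64*m) := by
      rw [pvTot_snoc, ← hk, ← hv', hkw, pow_add, hT]; ring
    have hlen : (vs ++ [v]).length = k + 1 := by simp [hk]
    have hkw1 : (k+1) * w = 64*m + b + w := by rw [Nat.add_mul, one_mul, hkw]
    set curN := c + v' * 2^b with hcur
    have hTd : pvTot w (vs ++ [v]) / 2^(64*m) = curN := by
      rw [hT', Nat.add_mul_div_right _ _ (Nat.two_pow_pos _), hcur, hc]
    have hcur64 : curN < 2^(b+w) := by
      rw [hcur, pow_add]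
      nlinarith [Nat.two_pow_pos b, Nat.two_pow_pos w]
    unfold packStepA
    simp only
    rw [pv_band_mask v w, ← pvRes_cast w v, ← hv', Int.toNat_natCast,
        pv_shiftL_cast v' b, PySem.Int.bor_natCast, pv_lor_sh b c v' hclt, ← hcur]
    rw [show ((b : Nat) : Int) + ((w : Nat) : Int) = (((b + w : Nat)) : Int) by push_cast; ring]
    split_ifs with hge hgt
    · -- straddle branch: b + w > 64
      have hgt' : 64 < b + w := by exact_mod_cast hgt
      have hmod : (vs ++ [v]).length * w % 64 = b + w - 64 := by
        rw [hlen, hkw1]; omega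
      have hdiv : (vs ++ [v]).length * w / 64 = m + 1 := by
        rw [hlen, hkw1]; omega
      have hsub : (((w : Nat) : Int) - ((((b + w : Nat)) : Int) - 64)).toNat = 64 - b := by
        omega
      refine Prod.ext ?_ (Prod.ext ?_ ?_)
      · simp only [hdiv]
        rw [pvChunk_snoc, hT', pvChunk_congr,
            Nat.add_mul_div_right _ _ (Nat.two_pow_pos _), ← hc, ← hcur,
            pv_band_mask (((curN : Nat) : Int)) 64,
            show ((curN : Nat) : Int) % 2^64 = ((curN % 2^64 : Nat) : Int) by push_cast; ring]
      · simp only [hdiv, hsub]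
        rw [pv_shiftR_cast, Nat.shiftRight_eq_div_pow]
        rw [hT', show 64*(m+1) = 64*m + 64 by ring, pow_add, ← Nat.div_div_eq_div_mul,
            Nat.add_mul_div_right _ _ (Nat.two_pow_pos _), ← hc]
        congr 1
        have hd : 64 - b + b = 64 := by omega
        have hsplit : c + v' * 2^b = (c + (v' % 2^(64-b)) * 2^b) + (v' / 2^(64-b)) * 2^64 := by
          have hq := Nat.div_add_mod v' (2^(64-b))
          have h2 : (2:Nat)^(64-b) * 2^b = 2^64 := by rw [← pow_add, hd]
          calc c + v' * 2^b
              = c + (2^(64-b) * (v' / 2^(64-b)) + v' % 2^(64-b)) * 2^b := by rw [hq]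
            _ = (c + (v' % 2^(64-b)) * 2^b) + (v' / 2^(64-b)) * (2^(64-b) * 2^b) := by ring
            _ = (c + (v' % 2^(64-b)) * 2^b) + (v' / 2^(64-b)) * 2^64 := by rw [h2]
        have hsmall : c + (v' % 2^(64-b)) * 2^b < 2^64 := by
          have h1 : v' % 2^(64-b) < 2^(64-b) := Nat.mod_lt _ (Nat.two_pow_pos _)
          have h2 : (2:Nat)^64 = 2^(64-b) * 2^b := by rw [← pow_add, hd]
          rw [h2]
          nlinarith [Nat.two_pow_pos b, Nat.two_pow_pos (64-b)]
        rw [hsplit, Nat.add_mul_div_right _ _ (Nat.two_pow_pos 64), Nat.div_eq_of_lt hsmall,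
            Nat.zero_add]
      · rw [hmod]; push_cast; omega
    · -- exact fill: b + w = 64
      have hge' : 64 ≤ b + w := by exact_mod_cast hge
      have hgt' : ¬ (64 < b + w) := fun h => hgt (by exact_mod_cast h)
      have heq : b + w = 64 := by omega
      have hmod : (vs ++ [v]).length * w % 64 = 0 := by
        rw [hlen, hkw1]; omega
      have hdiv : (vs ++ [v]).length * w / 64 = m + 1 := by
        rw [hlen, hkw1]; omega
      refine Prod.ext ?_ (Prod.ext ?_ ?_)
      · simp only [hdiv]
        rw [pvChunk_snoc, hT', pvChunk_congr,
            Nat.add_mul_div_right _ _ (Nat.two_pow_pos _), ← hc, ← hcur,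
            Nat.mod_eq_of_lt (by rw [← heq]; exact hcur64)]
      · simp only [hdiv]
        rw [hT', show 64*(m+1) = 64*m + 64 by ring, pow_add, ← Nat.div_div_eq_div_mul,
            Nat.add_mul_div_right _ _ (Nat.two_pow_pos _), ← hc, ← hcur,
            Nat.div_eq_of_lt (by rw [← heq]; exact hcur64)]
        simp
      · rw [hmod]; simp
    · -- still filling: b + w < 64
      have hge' : ¬ (64 ≤ b + w) := fun h => hge (by exact_mod_cast h)
      have hmod : (vs ++ [v]).length * w % 64 = b + w := by
        rw [hlen, hkw1]; omega
      have hdiv : (vs ++ [v]).length * w / 64 = m := by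
        rw [hlen, hkw1]; omega
      refine Prod.ext ?_ (Prod.ext ?_ ?_)
      · simp only [hdiv]
        rw [hT', pvChunk_congr]
      · simp only [hdiv]
        rw [hTd]
      · rw [hmod]

-- w = 0 degenerate: A's loop never changes its state
theorem pv_A_zero (vs : List Int) :
    vs.foldl (packStepA ((0:Nat) : Int) (((1 <<< (0:Nat) : Nat) : Int) - 1)) ([], 0, 0)
    = ([], 0, 0) := by
  induction vs with
  | nil => rfl
  | cons v vs ih =>
    rw [List.foldl_cons]
    have hstep : packStepA ((0:Nat) : Int) (((1 <<< (0:Nat) : Nat) : Int) - 1) ([], 0, 0) v = ([], 0, 0) := by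
      unfold packStepA
      rw [pv_band_mask v 0]
      norm_num
    rw [hstep, ih]

-- casts for the B-side entry points
theorem pv_floordiv64 (a : Nat) : PySem.Int.floordiv ((a : Nat) : Int) 64 = ((a / 64 : Nat) : Int) := by
  exact_mod_cast PySem.Int.floordiv_natCast a 64

-- ===== VERDICT (by name: the statement is the Claim_ definition above) =====
theorem pack_to_words_py_spec : Claim_equal_pack_to_words_py := by
  unfold Claim_equal_pack_to_words_py Spec_pack_to_words_py Pre_pack_to_words_py
  intro dl wI _ hpre
  obtain ⟨h0, h64⟩ := hpre
  obtain ⟨w, rfl⟩ : ∃ w : Nat, wI = (w : Int) := ⟨wI.toNat, (Int.toNat_of_nonneg h0).symm⟩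
  have hw64 : w ≤ 64 := by exact_mod_cast h64
  simp only [pack_to_words_py, pack_to_words_py_alt, Int.toNat_natCast]
  -- B's big total
  have hBt := pv_B_total w dl 0 0 (by norm_num)
  simp only [Nat.zero_mul, pow_zero, Nat.zero_add, Nat.one_mul, Nat.cast_zero] at hBt
  rw [hBt]
  -- B's word count
  have hcnt : ((dl.length : Int) * ((w:Nat) : Int) + 63) = (((dl.length * w + 63 : Nat)) : Int) := by
    push_cast; ring
  rw [hcnt, pv_floordiv64]
  -- B's chunk loop
  rw [pv_B_chunk ((dl.length * w + 63) / 64) (pvTot w dl) []]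
  simp only [List.nil_append]
  rcases Nat.eq_zero_or_pos w with hw | hw
  · -- degenerate width 0
    subst hw
    rw [pv_A_zero dl]
    have hn : (dl.length * 0 + 63) / 64 = 0 := by omega
    rw [hn]
    norm_num [pvChunk]
  · -- main case
    rw [pv_A_loop w hw64 hw dl]
    simp only
    set L := dl.length with hL
    set T := pvTot w dl with hT
    set m := L * w / 64 with hm
    set b := L * w % 64 with hb
    have hTlt : T < 2^(L*w) := pvTot_lt w dl
    have hkw : L * w = 64 * m + b := (Nat.div_add_mod (L*w) 64).symm
    have hblt : b < 64 := Nat.mod_lt _ (by norm_num)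
    have hclt : T / 2^(64*m) < 2^b := by
      rw [Nat.div_lt_iff_lt_mul (Nat.two_pow_pos _), ← pow_add]
      rw [show b + 64*m = 64*m + b by ring, ← hkw]; exact hTlt
    rcases Nat.eq_zero_or_pos b with hb0 | hb0
    · -- no trailing partial word
      have hn : (L * w + 63) / 64 = m := by omega
      have hif : ¬ (((b : Nat) : Int) > 0) := by
        rw [hb0]; norm_num
      rw [if_neg hif, hn]
    · -- trailing partial word
      have hn : (L * w + 63) / 64 = m + 1 := by omega
      have hif : (((b : Nat) : Int) > 0) := by exact_mod_cast hb0
      rw [if_pos hif, hn, pvChunk_snoc]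
      have hlt64 : T / 2^(64*m) < 2^64 :=
        lt_of_lt_of_le hclt (Nat.pow_le_pow_right (by norm_num) (by omega))
      rw [Nat.mod_eq_of_lt hlt64]
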